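-- pv_equiv track=rewrite | github.com/grygry12345/tcn_project | eval.py | _get_labels_start_end_time
-- ===== SOURCE A (Python) =====
-- def _get_labels_start_end_time(frame_wise_labels, bg_class=[-1]):
--     labels = []
--     starts = []
--     ends = []
--     last_label = frame_wise_labels[0]
--     if frame_wise_labels[0] not in bg_class:
--         labels.append(frame_wise_labels[0])
--         starts.append(0)
--     for i in range(len(frame_wise_labels)):
--         if frame_wise_labels[i] != last_label:
--             if frame_wise_labels[i] not in bg_class:
--                 labels.append(frame_wise_labels[i])
--                 starts.append(i)
--             if last_label not in bg_class:
--                 ends.append(i)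
--             last_label = frame_wise_labels[i]
--     if last_label not in bg_class:
--         ends.append(i)
--     return labels, starts, ends
-- ===== SOURCE B (Python) =====
-- def _get_labels_start_end_time(frame_wise_labels, bg_class=[-1]):
--     n = len(frame_wise_labels)
--     run_starts = [i for i in range(n)
--                   if i == 0 or frame_wise_labels[i] != frame_wise_labels[i - 1]]
--     run_ends = run_starts[1:] + [n - 1]
--     labels, starts, ends = [], [], []
--     for s, e in zip(run_starts, run_ends):
--         lab = frame_wise_labels[s]
--         if lab not in bg_class:
--             labels.append(lab)
--             starts.append(s)
--             ends.append(e)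
--     return labels, starts, ends
-- ===== Notes on version B (the rewrite author's own statement) =====
-- stated objective: idiomatic
-- what changed: A tracks last_label inline and appends labels/starts/ends at each boundary in one stateful loop; B is a two-pass decomposition: first compute all run-start indices, pair each with the next start (or len-1 for the last run), then filter out background runs and emit.
import Mathlib
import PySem

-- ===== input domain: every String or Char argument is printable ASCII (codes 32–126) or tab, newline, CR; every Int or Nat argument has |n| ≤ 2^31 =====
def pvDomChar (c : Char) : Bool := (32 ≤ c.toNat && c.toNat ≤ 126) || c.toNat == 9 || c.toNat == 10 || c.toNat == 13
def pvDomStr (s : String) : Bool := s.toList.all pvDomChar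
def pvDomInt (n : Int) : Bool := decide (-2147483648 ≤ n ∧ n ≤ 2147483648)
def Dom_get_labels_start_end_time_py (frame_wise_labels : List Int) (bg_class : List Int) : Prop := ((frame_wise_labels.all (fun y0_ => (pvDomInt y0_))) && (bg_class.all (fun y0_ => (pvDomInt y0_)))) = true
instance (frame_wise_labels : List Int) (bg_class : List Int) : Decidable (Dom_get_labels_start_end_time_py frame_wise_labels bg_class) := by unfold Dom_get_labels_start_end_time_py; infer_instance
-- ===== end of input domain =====

-- B replaces A's inline last-label boundary tracking by a two-pass decomposition:
-- first collect all run-start indices, then filter/emit runs against bg_class (idiomatic; same cost).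
-- A raises IndexError on an empty frame list (excluded by Pre_); B returns ([], [], []) there.

-- ===== PORT A =====
-- A's loop body over i in range(len(frame_wise_labels)); state = (labels, starts, ends, last_label)
def pvStepA (frame_wise_labels bg_class : List Int)
    (st : List Int × List Int × List Int × Int) (i : Int) :
    List Int × List Int × List Int × Int :=
  let x := PySem.List.pyGetD frame_wise_labels i 0    -- frame_wise_labels[i]; i is in range inside the loop
  if x ≠ st.2.2.2 then
    let labels := if x ∉ bg_class then st.1 ++ [x] else st.1
    let starts := if x ∉ bg_class then st.2.1 ++ [i] else st.2.1
    let ends := if st.2.2.2 ∉ bg_class then st.2.2.1 ++ [i] else st.2.2.1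
    (labels, starts, ends, x)
  else st

def get_labels_start_end_time_py (frame_wise_labels : List Int) (bg_class : List Int) :
    List Int × List Int × List Int :=
  match frame_wise_labels with
  | [] => ([], [], [])   -- Python raises IndexError on frame_wise_labels[0]; excluded by Pre_
  | f0 :: _ =>
    let n : Int := PySem.List.len frame_wise_labels
    let init : List Int × List Int × List Int × Int :=
      if f0 ∉ bg_class then ([f0], [0], [], f0) else ([], [], [], f0)
    let st := (PySem.List.pyRange 0 n 1).foldl (pvStepA frame_wise_labels bg_class) init
    (st.1, st.2.1, if st.2.2.2 ∉ bg_class then st.2.2.1 ++ [n - 1] else st.2.2.1)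

-- ===== PORT B =====
-- B's emit loop body over (s, e) in zip(run_starts, run_ends); acc = (labels, starts, ends)
def pvStepB (frame_wise_labels bg_class : List Int)
    (acc : List Int × List Int × List Int) (se : Int × Int) :
    List Int × List Int × List Int :=
  let lab := PySem.List.pyGetD frame_wise_labels se.1 0    -- frame_wise_labels[s]; s is a valid index
  if lab ∉ bg_class then (acc.1 ++ [lab], acc.2.1 ++ [se.1], acc.2.2 ++ [se.2]) else acc

def get_labels_start_end_time_py_alt (frame_wise_labels : List Int) (bg_class : List Int) :
    List Int × List Int × List Int :=
  let n : Int := PySem.List.len frame_wise_labels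
  let run_starts := (PySem.List.pyRange 0 n 1).filter (fun i =>
    i == 0 || (PySem.List.pyGetD frame_wise_labels i 0 != PySem.List.pyGetD frame_wise_labels (i - 1) 0))
  let run_ends := PySem.List.slice run_starts (some 1) none ++ [n - 1]   -- run_starts[1:] + [n - 1]
  (List.zip run_starts run_ends).foldl (pvStepB frame_wise_labels bg_class) ([], [], [])

-- ===== PRECONDITION & SPEC =====
-- Pre_ excludes exactly the empty frame list, on which Python A raises IndexError.
def Pre_get_labels_start_end_time_py (frame_wise_labels : List Int) (bg_class : List Int) : Prop :=
  frame_wise_labels ≠ []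
instance (frame_wise_labels : List Int) (bg_class : List Int) : Decidable (Pre_get_labels_start_end_time_py frame_wise_labels bg_class) := by unfold Pre_get_labels_start_end_time_py; infer_instance

def pvWitness_get_labels_start_end_time_py : List Int × List Int := ([2, 2, -1, 3, 3, -1], [-1])

def Spec_get_labels_start_end_time_py (frame_wise_labels : List Int) (bg_class : List Int) (out : List Int × List Int × List Int) : Prop := out = get_labels_start_end_time_py_alt frame_wise_labels bg_class
instance (frame_wise_labels : List Int) (bg_class : List Int) (out : List Int × List Int × List Int) : Decidable (Spec_get_labels_start_end_time_py frame_wise_labels bg_class out) := by unfold Spec_get_labels_start_end_time_py; infer_instance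

-- ===== CLAIM (what is proved, stated in full; the proofs are below) =====
def Claim_equal_get_labels_start_end_time_py : Prop := ∀ (frame_wise_labels : List Int) (bg_class : List Int), Dom_get_labels_start_end_time_py frame_wise_labels bg_class → Pre_get_labels_start_end_time_py frame_wise_labels bg_class → Spec_get_labels_start_end_time_py frame_wise_labels bg_class (get_labels_start_end_time_py frame_wise_labels bg_class)

-- ===== LEMMAS AND PROOFS =====

-- The run decomposition both programs compute: pvRuns last i t = the (label, absolute start index)
-- of each maximal run of t (at absolute positions i, i+1, …) whose label differs from its predecessor.
def pvRuns (last i : Int) : List Int → List (Int × Int)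
  | [] => []
  | x :: t => if x = last then pvRuns last (i + 1) t else (x, i) :: pvRuns x (i + 1) t

def pvRunsFull : List Int → List (Int × Int)
  | [] => []
  | f0 :: t => (f0, 0) :: pvRuns f0 1 t

-- label of the last run (A's final last_label)
def pvLastLab (last : Int) : List (Int × Int) → Int
  | [] => last
  | r :: rs => pvLastLab r.1 rs

-- the ends A appends DURING the loop: boundary index s of each new run, when the run it closes is non-bg
def pvEA (bg_class : List Int) (last : Int) : List (Int × Int) → List Int
  | [] => []
  | (x, s) :: rs => (if last ∉ bg_class then [s] else []) ++ pvEA bg_class x rs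

-- the ends B emits: for each non-bg run, the next run's start, or n-1 for the final run
def pvEndsB (bg_class : List Int) (n1 : Int) : List (Int × Int) → List Int
  | [] => []
  | (lab, _) :: rs =>
    (if lab ∉ bg_class then [match rs with | [] => n1 | r :: _ => r.2] else []) ++ pvEndsB bg_class n1 rs

-- common closed description of the output
def pvSpecOut (frame_wise_labels bg_class : List Int) : List Int × List Int × List Int :=
  let R := pvRunsFull frame_wise_labels
  (((R.filter (fun r => decide (r.1 ∉ bg_class))).map (·.1)),
   ((R.filter (fun r => decide (r.1 ∉ bg_class))).map (·.2)),
   pvEndsB bg_class (PySem.List.len frame_wise_labels - 1) R)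

theorem pvEA_endsB (bg_class : List Int) (n1 : Int) :
    ∀ (rs : List (Int × Int)) (last s0 : Int),
    pvEA bg_class last rs ++ (if pvLastLab last rs ∉ bg_class then [n1] else [])
      = pvEndsB bg_class n1 ((last, s0) :: rs) := by
  intro rs
  induction rs with
  | nil => intro last s0; simp [pvEA, pvLastLab, pvEndsB]
  | cons r rs ih =>
    intro last s0
    obtain ⟨x, s⟩ := r
    rw [pvEA, pvLastLab, List.append_assoc, ih x s]
    conv_rhs => rw [pvEndsB]

theorem pvGetD_enum (xs : List Int) :
    ∀ p ∈ PySem.List.enumerate xs 0, PySem.List.pyGetD xs p.1 0 = p.2 := by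
  intro p hp
  rw [PySem.List.mem_enumerate_iff] at hp
  obtain ⟨k, hk, rfl⟩ := hp
  simp only [zero_add]
  rw [PySem.List.pyGetD_natCast]
  simp [List.getD_eq_getElem?_getD, hk]

theorem pvFoldA (frame_wise_labels bg_class : List Int) :
    ∀ (t : List Int) (i last : Int) (ls ss es : List Int),
    (∀ p ∈ PySem.List.enumerate t i, PySem.List.pyGetD frame_wise_labels p.1 0 = p.2) →
    (PySem.List.enumerate t i).foldl
        (fun st p => pvStepA frame_wise_labels bg_class st p.1) (ls, ss, es, last)
      = (ls ++ ((pvRuns last i t).filter (fun r => decide (r.1 ∉ bg_class))).map (·.1),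
         ss ++ ((pvRuns last i t).filter (fun r => decide (r.1 ∉ bg_class))).map (·.2),
         es ++ pvEA bg_class last (pvRuns last i t),
         pvLastLab last (pvRuns last i t)) := by
  intro t
  induction t with
  | nil => intro i last ls ss es _; simp [PySem.List.enumerate_nil, pvRuns, pvEA, pvLastLab]
  | cons x t ih =>
    intro i last ls ss es ht
    rw [PySem.List.enumerate_cons]
    have hx : PySem.List.pyGetD frame_wise_labels i 0 = x :=
      ht (i, x) (by rw [PySem.List.enumerate_cons]; exact List.mem_cons_self)
    have ht' : ∀ p ∈ PySem.List.enumerate t (i + 1),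
        PySem.List.pyGetD frame_wise_labels p.1 0 = p.2 := by
      intro p hp; exact ht p (by rw [PySem.List.enumerate_cons]; exact List.mem_cons_of_mem _ hp)
    simp only [List.foldl_cons]
    by_cases hxl : x = last
    · have hstep : pvStepA frame_wise_labels bg_class (ls, ss, es, last) i = (ls, ss, es, last) := by
        simp [pvStepA, hx, hxl]
      rw [hstep, ih (i + 1) last ls ss es ht']
      simp [pvRuns, hxl]
    · have hstep : pvStepA frame_wise_labels bg_class (ls, ss, es, last) i
          = (if x ∉ bg_class then ls ++ [x] else ls,
             if x ∉ bg_class then ss ++ [i] else ss,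
             if last ∉ bg_class then es ++ [i] else es, x) := by
        simp [pvStepA, hx, hxl]
      rw [hstep]
      by_cases hbg : x ∈ bg_class <;> by_cases hlbg : last ∈ bg_class <;>
        simp only [hbg, hlbg, not_true, not_false_iff, if_true, if_false, ite_true, ite_false] <;>
        rw [ih (i + 1) x _ _ _ ht'] <;>
        simp [pvRuns, hxl, hbg, hlbg, pvEA, pvLastLab]

theorem pvA_eq_spec (frame_wise_labels bg_class : List Int) :
    get_labels_start_end_time_py frame_wise_labels bg_class = pvSpecOut frame_wise_labels bg_class := by
  match frame_wise_labels with
  | [] => simp [get_labels_start_end_time_py, pvSpecOut, pvRunsFull, pvEndsB]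
  | f0 :: t =>
    have hrw : ∀ init, List.foldl (pvStepA (f0 :: t) bg_class) init
          (PySem.List.pyRange 0 (PySem.List.len (f0 :: t)) 1)
        = List.foldl (fun st p => pvStepA (f0 :: t) bg_class st p.1) init
          (PySem.List.enumerate (f0 :: t) 0) := by
      intro init
      rw [PySem.List.enumerate_eq_map_pyRange (f0 :: t) 0, List.foldl_map]
    have henum := pvGetD_enum (f0 :: t)
    have ht' : ∀ p ∈ PySem.List.enumerate t 1, PySem.List.pyGetD (f0 :: t) p.1 0 = p.2 := by
      intro p hp
      exact henum p (by rw [PySem.List.enumerate_cons]; simpa using List.mem_cons_of_mem _ hp)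
    have h0 : PySem.List.pyGetD (f0 :: t) (0 : Int) 0 = f0 := by
      simpa using henum (0, f0) (by rw [PySem.List.enumerate_cons]; exact List.mem_cons_self)
    show (let n : Int := PySem.List.len (f0 :: t);
      let init : List Int × List Int × List Int × Int :=
        if f0 ∉ bg_class then ([f0], [0], [], f0) else ([], [], [], f0);
      let st := (PySem.List.pyRange 0 n 1).foldl (pvStepA (f0 :: t) bg_class) init
      (st.1, st.2.1, if st.2.2.2 ∉ bg_class then st.2.2.1 ++ [n - 1] else st.2.2.1))
      = pvSpecOut (f0 :: t) bg_class
    simp only [hrw]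
    rw [PySem.List.enumerate_cons]
    simp only [List.foldl_cons, zero_add]
    by_cases hf : f0 ∈ bg_class
    · rw [if_neg (not_not_intro hf)]
      have hc : pvStepA (f0 :: t) bg_class ([], [], [], f0) 0 = ([], [], [], f0) := by
        simp [pvStepA, h0]
      rw [hc, pvFoldA (f0 :: t) bg_class t 1 f0 [] [] [] ht']
      simp only [pvSpecOut, pvRunsFull]
      rw [← pvEA_endsB bg_class (PySem.List.len (f0 :: t) - 1) (pvRuns f0 1 t) f0 0]
      by_cases hL : pvLastLab f0 (pvRuns f0 1 t) ∈ bg_class <;>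
        simp [hf, hL, List.filter_cons, List.append_assoc]
    · rw [if_pos hf]
      have hb : pvStepA (f0 :: t) bg_class ([f0], [0], [], f0) 0 = ([f0], [0], [], f0) := by
        simp [pvStepA, h0]
      rw [hb, pvFoldA (f0 :: t) bg_class t 1 f0 [f0] [0] [] ht']
      simp only [pvSpecOut, pvRunsFull]
      rw [← pvEA_endsB bg_class (PySem.List.len (f0 :: t) - 1) (pvRuns f0 1 t) f0 0]
      by_cases hL : pvLastLab f0 (pvRuns f0 1 t) ∈ bg_class <;>
        simp [hf, hL, List.filter_cons, List.append_assoc]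

theorem pvGetD_append_len (pre t : List Int) (x : Int) :
    PySem.List.pyGetD (pre ++ x :: t) ((pre.length : Int)) 0 = x := by
  rw [PySem.List.pyGetD_natCast]
  rw [List.getD_eq_getElem?_getD, List.getElem?_append_right (le_refl pre.length)]
  simp

theorem pvGetD_last (pre t : List Int) (hpre : pre ≠ []) :
    PySem.List.pyGetD (pre ++ t) ((pre.length : Int) - 1) 0 = pre.getLast hpre := by
  have hlen : 0 < pre.length := List.length_pos_iff.mpr hpre
  have hcast : ((pre.length : Int) - 1) = ((pre.length - 1 : Nat) : Int) := by omega
  rw [hcast, PySem.List.pyGetD_natCast]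
  have hlt : pre.length - 1 < pre.length := by omega
  rw [List.getD_eq_getElem?_getD, List.getElem?_append_left hlt]
  simp [List.getElem?_eq_getElem hlt, List.getLast_eq_getElem]

theorem pvB1aux :
    ∀ (t pre : List Int) (hpre : pre ≠ []),
    (PySem.List.pyRange (pre.length : Int) ((pre.length : Int) + (t.length : Int)) 1).filter
        (fun i => i == 0 || (PySem.List.pyGetD (pre ++ t) i 0 != PySem.List.pyGetD (pre ++ t) (i - 1) 0))
      = (pvRuns (pre.getLast hpre) (pre.length : Int) t).map (·.2) := by
  intro t
  induction t with
  | nil =>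
    intro pre hpre
    rw [PySem.List.pyRange_one_eq_nil (by simp)]
    simp [pvRuns]
  | cons x t ih =>
    intro pre hpre
    have hlen : 0 < pre.length := List.length_pos_iff.mpr hpre
    have hcons : PySem.List.pyRange (pre.length : Int) ((pre.length : Int) + ((x :: t).length : Int)) 1
        = (pre.length : Int) :: PySem.List.pyRange ((pre.length : Int) + 1) ((pre.length : Int) + ((x :: t).length : Int)) 1 := by
      apply PySem.List.pyRange_one_cons
      simp
    rw [hcons, List.filter_cons]
    have hx : PySem.List.pyGetD (pre ++ x :: t) ((pre.length : Int)) 0 = x := pvGetD_append_len pre t x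
    have hprev : PySem.List.pyGetD (pre ++ x :: t) ((pre.length : Int) - 1) 0 = pre.getLast hpre :=
      pvGetD_last pre (x :: t) hpre
    have happ : pre ++ x :: t = (pre ++ [x]) ++ t := by simp
    have hpre' : pre ++ [x] ≠ [] := by simp
    have hlast' : (pre ++ [x]).getLast hpre' = x := by simp
    have hlen' : (((pre ++ [x]).length : Nat) : Int) = (pre.length : Int) + 1 := by simp
    have htail := ih (pre ++ [x]) hpre'
    rw [hlast'] at htail
    have hrange : ((pre.length : Int) + 1) + (t.length : Int)
        = (pre.length : Int) + ((x :: t).length : Int) := by simp; omega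
    rw [hlen', hrange] at htail
    by_cases hxe : x = pre.getLast hpre
    · have hpred : ((pre.length : Int) == 0
          || (PySem.List.pyGetD (pre ++ x :: t) ((pre.length : Int)) 0
              != PySem.List.pyGetD (pre ++ x :: t) ((pre.length : Int) - 1) 0)) = false := by
        rw [hx, hprev]
        simp [hxe] <;> omega
      rw [hpred, if_neg (by simp)]
      simp only [pvRuns, if_pos hxe]
      rw [happ, ← hxe]
      exact htail
    · have hpred : ((pre.length : Int) == 0
          || (PySem.List.pyGetD (pre ++ x :: t) ((pre.length : Int)) 0
              != PySem.List.pyGetD (pre ++ x :: t) ((pre.length : Int) - 1) 0)) = true := by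
        rw [hx, hprev]
        simp [hxe]
      rw [hpred, if_pos rfl]
      simp only [pvRuns, if_neg hxe, List.map_cons]
      rw [happ]
      exact congrArg _ htail

theorem pvB2 :
    ∀ (t pre : List Int) (last : Int),
    ∀ p ∈ pvRuns last (pre.length : Int) t, PySem.List.pyGetD (pre ++ t) p.2 0 = p.1 := by
  intro t
  induction t with
  | nil => intro pre last p hp; simp [pvRuns] at hp
  | cons x t ih =>
    intro pre last p hp
    have happ : pre ++ x :: t = (pre ++ [x]) ++ t := by simp
    have hlen' : (((pre ++ [x]).length : Nat) : Int) = (pre.length : Int) + 1 := by simp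
    rw [pvRuns] at hp
    by_cases hxe : x = last
    · rw [if_pos hxe] at hp
      rw [happ]
      have := ih (pre ++ [x]) last p (by rw [hlen']; exact hp)
      exact this
    · rw [if_neg hxe] at hp
      rcases List.mem_cons.mp hp with h | h
      · subst h
        exact pvGetD_append_len pre t x
      · rw [happ]
        exact ih (pre ++ [x]) x p (by rw [hlen']; exact h)

theorem pvB3 (frame_wise_labels bg_class : List Int) (n1 : Int) :
    ∀ (R : List (Int × Int)),
    (∀ p ∈ R, PySem.List.pyGetD frame_wise_labels p.2 0 = p.1) →
    ∀ (ls ss es : List Int),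
    (List.zip (R.map (·.2)) ((R.map (·.2)).tail ++ [n1])).foldl
        (pvStepB frame_wise_labels bg_class) (ls, ss, es)
      = (ls ++ ((R.filter (fun r => decide (r.1 ∉ bg_class))).map (·.1)),
         ss ++ ((R.filter (fun r => decide (r.1 ∉ bg_class))).map (·.2)),
         es ++ pvEndsB bg_class n1 R) := by
  intro R
  induction R with
  | nil => intro _ ls ss es; simp [pvEndsB]
  | cons r R ih =>
    intro hR ls ss es
    obtain ⟨lab, s⟩ := r
    have hs : PySem.List.pyGetD frame_wise_labels s 0 = lab := hR (lab, s) List.mem_cons_self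
    have hR' : ∀ p ∈ R, PySem.List.pyGetD frame_wise_labels p.2 0 = p.1 :=
      fun p hp => hR p (List.mem_cons_of_mem _ hp)
    match R with
    | [] =>
      simp only [List.map_cons, List.map_nil, List.tail_cons, List.nil_append,
        List.zip_cons_cons, List.zip_nil_right, List.foldl_cons, List.foldl_nil]
      by_cases hbg : lab ∈ bg_class <;> simp [pvStepB, hs, hbg, pvEndsB]
    | (lab2, s2) :: R' =>
      have hzip : List.zip (((lab, s) :: (lab2, s2) :: R').map (·.2))
            ((((lab, s) :: (lab2, s2) :: R').map (·.2)).tail ++ [n1])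
          = (s, s2) :: List.zip (((lab2, s2) :: R').map (·.2))
            ((((lab2, s2) :: R').map (·.2)).tail ++ [n1]) := by
        simp [List.zip_cons_cons]
      rw [hzip, List.foldl_cons]
      by_cases hbg : lab ∈ bg_class
      · have hstep : pvStepB frame_wise_labels bg_class (ls, ss, es) (s, s2) = (ls, ss, es) := by
          simp [pvStepB, hs, hbg]
        rw [hstep, ih hR' ls ss es]
        simp [hbg, pvEndsB]
      · have hstep : pvStepB frame_wise_labels bg_class (ls, ss, es) (s, s2)
            = (ls ++ [lab], ss ++ [s], es ++ [s2]) := by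
          simp [pvStepB, hs, hbg]
        rw [hstep, ih hR' _ _ _]
        simp [hbg, pvEndsB]

theorem pvRunsFull_labels (frame_wise_labels : List Int) :
    ∀ p ∈ pvRunsFull frame_wise_labels, PySem.List.pyGetD frame_wise_labels p.2 0 = p.1 := by
  match frame_wise_labels with
  | [] => intro p hp; simp [pvRunsFull] at hp
  | f0 :: t =>
    intro p hp
    rw [pvRunsFull] at hp
    rcases List.mem_cons.mp hp with h | h
    · subst h
      simp [PySem.List.pyGetD_zero_cons]
    · have := pvB2 t [f0] f0 p (by simpa using h)
      simpa using this

theorem pvB_run_starts (frame_wise_labels : List Int) :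
    (PySem.List.pyRange 0 (PySem.List.len frame_wise_labels) 1).filter (fun i =>
        i == 0 || (PySem.List.pyGetD frame_wise_labels i 0
            != PySem.List.pyGetD frame_wise_labels (i - 1) 0))
      = (pvRunsFull frame_wise_labels).map (·.2) := by
  match frame_wise_labels with
  | [] => simp [pvRunsFull, PySem.List.pyRange_one_eq_nil, PySem.List.len]
  | f0 :: t =>
    have hn : PySem.List.len (f0 :: t) = ((1 : Int) + (t.length : Int)) := by
      simp [PySem.List.len_eq]; omega
    have hcons : PySem.List.pyRange 0 (PySem.List.len (f0 :: t)) 1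
        = 0 :: PySem.List.pyRange 1 (PySem.List.len (f0 :: t)) 1 := by
      apply PySem.List.pyRange_one_cons
      rw [hn]; omega
    rw [hcons, List.filter_cons]
    have hpred0 : (((0 : Int) == 0)
        || (PySem.List.pyGetD (f0 :: t) (0 : Int) 0
            != PySem.List.pyGetD (f0 :: t) ((0 : Int) - 1) 0)) = true := by simp
    rw [hpred0, if_pos rfl]
    have hA := pvB1aux t [f0] (by simp)
    simp only [List.length_singleton, Nat.cast_one, List.getLast_singleton,
      List.singleton_append] at hA
    rw [pvRunsFull, List.map_cons, hn]
    exact congrArg _ hA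

theorem pvB_eq_spec (frame_wise_labels bg_class : List Int) :
    get_labels_start_end_time_py_alt frame_wise_labels bg_class
      = pvSpecOut frame_wise_labels bg_class := by
  show (let n : Int := PySem.List.len frame_wise_labels;
    let run_starts := (PySem.List.pyRange 0 n 1).filter (fun i =>
      i == 0 || (PySem.List.pyGetD frame_wise_labels i 0 != PySem.List.pyGetD frame_wise_labels (i - 1) 0));
    let run_ends := PySem.List.slice run_starts (some 1) none ++ [n - 1]
    (List.zip run_starts run_ends).foldl (pvStepB frame_wise_labels bg_class) ([], [], []))
    = pvSpecOut frame_wise_labels bg_class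
  simp only [pvB_run_starts, PySem.List.slice_from_one]
  rw [pvB3 frame_wise_labels bg_class (PySem.List.len frame_wise_labels - 1)
    (pvRunsFull frame_wise_labels) (pvRunsFull_labels frame_wise_labels) [] [] []]
  simp [pvSpecOut]

-- ===== VERDICT (by name: the statement is the Claim_ definition above) =====
theorem get_labels_start_end_time_py_spec : Claim_equal_get_labels_start_end_time_py := by
  intro frame_wise_labels bg_class _ _
  unfold Spec_get_labels_start_end_time_py
  rw [pvA_eq_spec, pvB_eq_spec]
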